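-- pv_equiv track=rewrite | github.com/joycevandersel/joycevandersel | Algorithms-in-bioinformatics/Hidden_Markov_Model.py | guide_list
-- ===== SOURCE A (Python) =====
-- def guide_list(seqs):
--     """ Creates a list that keeps track of a position is a match state or not.
--
--     :param seqs: list; protein sequence alignments.
--     :return: list; containing a 'M' or 'I', depending on if it is a match state
--                 or not.
--
--     A position is a match state when more than half of the positions in
--     the sequences contain a protein.
--     """
--     pos = list(zip(*seqs))
--     guide = []
--     for item in pos:
--         if item.count('-') > len(item) / 2:
--             guide.append('I')
--         else:
--             guide.append('M')
--     return guide
-- ===== SOURCE B (Python) =====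
-- def guide_list(seqs):
--     if not seqs:
--         return []
--     m = min(len(s) for s in seqs)
--     counts = [0] * m
--     for s in seqs:
--         counts = [c + (ch == '-') for c, ch in zip(counts, s)]
--     n = len(seqs)
--     return ['I' if 2 * c > n else 'M' for c in counts]
-- ===== Notes on version B (the rewrite author's own statement) =====
-- stated objective: alternative
-- what changed: B replaces A's materialized zip(*seqs) column tuples with a row-major pass that maintains a running gap-count table of length min(len(s)), then emits 'I'/'M' from the counts.
import Mathlib
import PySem

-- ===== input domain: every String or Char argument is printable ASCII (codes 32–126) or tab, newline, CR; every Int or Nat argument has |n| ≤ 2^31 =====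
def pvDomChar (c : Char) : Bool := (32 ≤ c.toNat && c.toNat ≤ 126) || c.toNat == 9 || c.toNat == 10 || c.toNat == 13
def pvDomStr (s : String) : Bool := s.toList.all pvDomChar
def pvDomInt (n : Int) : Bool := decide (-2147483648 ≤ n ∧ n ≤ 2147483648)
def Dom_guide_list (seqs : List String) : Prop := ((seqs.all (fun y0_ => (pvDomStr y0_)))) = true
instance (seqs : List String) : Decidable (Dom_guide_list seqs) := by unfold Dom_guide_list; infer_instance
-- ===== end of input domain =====

-- B maintains a running per-column gap-count table in one row-major pass instead of
-- materializing A's zip(*seqs) column tuples; same result, same asymptotic cost.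

-- ===== PORT A =====
-- zip(*rows): emit the list of heads while every row is nonempty (exact port of Python's zip truncation)
def pyZipCols (rows : List (List Char)) : List (List Char) :=
  if _h : rows ≠ [] ∧ rows.all (fun r => !r.isEmpty) then
    (rows.map (fun r => r.headD ' ')) :: pyZipCols (rows.map List.tail)
  else []
termination_by (rows.map List.length).sum
decreasing_by
  obtain ⟨hne, hall⟩ := _h
  simp only [List.map_map, Function.comp_def]
  rw [List.attach_map_val (l := rows) (f := fun r => r.tail.length)]
  apply List.sum_lt_sum_of_ne_nil
  · exact hne
  · intro r hr
    have : ¬ r.isEmpty := by simpa using List.all_eq_true.mp hall r hr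
    cases r with
    | nil => simp at this
    | cons a l => simp

-- item.count('-') > len(item)/2 on ints is exactly 2*count > len
def guide_list (seqs : List String) : List String :=
  let pos := pyZipCols (seqs.map String.toList)
  pos.map (fun item => if 2 * (item.count '-') > item.length then "I" else "M")

-- ===== PORT B =====
def guide_list_alt (seqs : List String) : List String :=
  match seqs with
  | [] => []
  | s0 :: rest =>
    let m := rest.foldl (fun a s => min a s.toList.length) s0.toList.length
    let counts := seqs.foldl
      (fun cs s => List.zipWith (fun c ch => c + (if ch = '-' then 1 else 0)) cs s.toList)
      (List.replicate m 0)
    counts.map (fun c => if 2 * c > seqs.length then "I" else "M")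

-- ===== PRECONDITION & SPEC =====
def Spec_guide_list (seqs : List String) (out : List String) : Prop := out = guide_list_alt seqs
instance (seqs : List String) (out : List String) : Decidable (Spec_guide_list seqs out) := by unfold Spec_guide_list; infer_instance

-- ===== CLAIM (what is proved, stated in full; the proofs are below) =====
def Claim_equal_guide_list : Prop := ∀ (seqs : List String), Dom_guide_list seqs → Spec_guide_list seqs (guide_list seqs)

-- ===== LEMMAS AND PROOFS =====

-- minimum of a nonempty list of Nats, as B's fold computes it
def mins : List Nat → Nat
  | [] => 0
  | a :: l => l.foldl min a

theorem foldl_min_mem (l : List Nat) (a : Nat) : l.foldl min a = a ∨ l.foldl min a ∈ l := by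
  induction l generalizing a with
  | nil => simp
  | cons b l ih =>
    simp only [List.foldl_cons]
    rcases ih (min a b) with h | h
    · by_cases hab : a ≤ b
      · rw [Nat.min_eq_left hab] at h ⊢
        exact Or.inl h
      · right
        rw [Nat.min_eq_right (Nat.le_of_not_le hab)] at h ⊢
        rw [h]
        exact List.mem_cons_self ..
    · exact Or.inr (List.mem_cons_of_mem _ h)

theorem foldl_min_le (l : List Nat) : ∀ (a x : Nat), (x ∈ l ∨ x = a) → l.foldl min a ≤ x := by
  induction l with
  | nil =>
    intro a x hx
    rcases hx with h | h
    · simp at h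
    · subst h; simp
  | cons b l ih =>
    intro a x hx
    simp only [List.foldl_cons]
    rcases hx with hx | hx
    · rcases List.mem_cons.mp hx with h | h
      · subst h; exact le_trans (ih (min a x) (min a x) (Or.inr rfl)) (by omega)
      · exact ih _ x (Or.inl h)
    · subst hx; exact le_trans (ih (min x b) (min x b) (Or.inr rfl)) (by omega)

theorem mins_mem (l : List Nat) (h : l ≠ []) : mins l ∈ l := by
  cases l with
  | nil => simp at h
  | cons a l =>
    rcases foldl_min_mem l a with h1 | h1
    · simp [mins, h1]
    · simp [mins, h1]

theorem mins_le (l : List Nat) (x : Nat) (hx : x ∈ l) : mins l ≤ x := by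
  cases l with
  | nil => simp at hx
  | cons a l =>
    rcases List.mem_cons.mp hx with h | h
    · subst h; exact foldl_min_le l x x (Or.inr rfl)
    · exact foldl_min_le l a x (Or.inl h)

theorem foldl_min_pred (l : List Nat) (a : Nat) :
    (l.map (· - 1)).foldl min (a - 1) = l.foldl min a - 1 := by
  induction l generalizing a with
  | nil => simp
  | cons b l ih =>
    simp only [List.map_cons, List.foldl_cons]
    rw [show min (a - 1) (b - 1) = min a b - 1 by omega, ih]

theorem mins_map_pred (l : List Nat) : mins (l.map (· - 1)) = mins l - 1 := by
  cases l with
  | nil => simp [mins]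
  | cons a l => simp only [List.map_cons, mins]; exact foldl_min_pred l a

theorem getD_tail (r : List Char) (j : Nat) : r.tail.getD j ' ' = r.getD (j + 1) ' ' := by
  cases r <;> simp

theorem zip_cols (n : Nat) : ∀ (rows : List (List Char)), rows ≠ [] →
    mins (rows.map List.length) = n →
    pyZipCols rows = (List.range n).map (fun j => rows.map (fun r => r.getD j ' ')) := by
  induction n with
  | zero =>
    intro rows hne hm
    rw [pyZipCols, dif_neg]
    · simp
    · rintro ⟨-, hall⟩
      have hmem := mins_mem (rows.map List.length) (by simpa using hne)
      rw [hm] at hmem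
      obtain ⟨r, hr, hlen⟩ := List.mem_map.mp hmem
      have := List.all_eq_true.mp hall r hr
      cases r with
      | nil => simp at this
      | cons a l => simp at hlen
  | succ n ih =>
    intro rows hne hm
    have hall : rows.all (fun r => !r.isEmpty) = true := by
      rw [List.all_eq_true]
      intro r hr
      have h1 : mins (rows.map List.length) ≤ r.length :=
        mins_le _ _ (List.mem_map.mpr ⟨r, hr, rfl⟩)
      cases r with
      | nil => rw [hm] at h1; simp at h1
      | cons a l => simp
    rw [pyZipCols, dif_pos ⟨hne, hall⟩]
    have hlen : (rows.map List.tail).map List.length = (rows.map List.length).map (· - 1) := by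
      simp only [List.map_map]
      exact List.map_congr_left (fun r _ => by cases r <;> simp)
    have hmins : mins ((rows.map List.tail).map List.length) = n := by
      rw [hlen, mins_map_pred, hm]; omega
    rw [ih (rows.map List.tail) (by simpa using hne) hmins]
    rw [List.range_succ_eq_map]
    simp only [List.map_cons, List.map_map]
    refine congrArg₂ List.cons ?_ ?_
    · exact List.map_congr_left (fun r hr => by
        have := List.all_eq_true.mp hall r hr
        cases r with
        | nil => simp at this
        | cons a l => simp)
    · exact List.map_congr_left (fun j _ => by
        simp only [Function.comp_apply, Nat.succ_eq_add_one]
        exact List.map_congr_left (fun r _ => by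
          simp only [Function.comp_apply]; exact getD_tail r j))

theorem getD_replicate_zero (n j : Nat) : (List.replicate n (0 : Nat)).getD j 0 = 0 := by
  rw [List.getD_eq_getElem?_getD, List.getElem?_replicate]
  split <;> simp

theorem fold_counts : ∀ (rows : List (List Char)) (cs : List Nat),
    (∀ r ∈ rows, cs.length ≤ r.length) →
    rows.foldl (fun cs s => List.zipWith (fun c ch => c + (if ch = '-' then 1 else 0)) cs s) cs
    = (List.range cs.length).map
        (fun j => cs.getD j 0 + rows.countP (fun r => r.getD j ' ' == '-')) := by
  intro rows
  induction rows with
  | nil =>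
    intro cs _
    simp only [List.foldl_nil, List.countP_nil, Nat.add_zero]
    apply List.ext_getElem
    · simp
    · intro i h1 h2
      simp [List.getD_eq_getElem?_getD, h1]
  | cons r rs ih =>
    intro cs h
    have hr : cs.length ≤ r.length := h r (List.mem_cons_self ..)
    have hcs' : (List.zipWith (fun c ch => c + (if ch = '-' then 1 else 0)) cs r).length
        = cs.length := by simp; omega
    rw [List.foldl_cons, ih _ (by intro r' hr'; rw [hcs']; exact h r' (List.mem_cons_of_mem _ hr'))]
    rw [hcs']
    apply List.map_congr_left
    intro j hj
    have hjlt : j < cs.length := List.mem_range.mp hj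
    have hz : (List.zipWith (fun c ch => c + (if ch = '-' then 1 else 0)) cs r).getD j 0
        = cs.getD j 0 + (if r.getD j ' ' = '-' then 1 else 0) := by
      have hjr : j < r.length := lt_of_lt_of_le hjlt hr
      rw [List.getD_eq_getElem?_getD, List.getD_eq_getElem?_getD, List.getD_eq_getElem?_getD,
        List.getElem?_eq_getElem (by rw [hcs']; exact hjlt),
        List.getElem?_eq_getElem hjlt, List.getElem?_eq_getElem hjr]
      simp [List.getElem_zipWith]
    rw [hz, List.countP_cons]
    have : (if r.getD j ' ' = '-' then 1 else 0) = (if (r.getD j ' ' == '-') = true then 1 else 0) := by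
      simp
    omega

theorem guide_list_spec : Claim_equal_guide_list := by
  intro seqs _
  unfold Spec_guide_list
  cases seqs with
  | nil =>
    rw [guide_list, guide_list_alt]
    rw [pyZipCols]
    simp
  | cons s0 rest =>
    rw [guide_list, guide_list_alt]
    have hrne : (s0 :: rest).map String.toList ≠ [] := by simp
    have hm : mins (((s0 :: rest).map String.toList).map List.length)
        = rest.foldl (fun a s => min a s.toList.length) s0.toList.length := by
      simp only [List.map_map, List.map_cons, mins, List.foldl_map]
      rfl
    rw [zip_cols _ ((s0 :: rest).map String.toList) hrne hm]
    have hfold : (s0 :: rest).foldl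
        (fun cs s => List.zipWith (fun c ch => c + (if ch = '-' then 1 else 0)) cs s.toList)
        (List.replicate (rest.foldl (fun a s => min a s.toList.length) s0.toList.length) 0)
        = ((s0 :: rest).map String.toList).foldl
        (fun cs s => List.zipWith (fun c ch => c + (if ch = '-' then 1 else 0)) cs s)
        (List.replicate (rest.foldl (fun a s => min a s.toList.length) s0.toList.length) 0) := by
      rw [List.foldl_map]
    rw [hfold, fold_counts _ _ (by
      intro r hr
      rw [List.length_replicate, ← hm]
      exact mins_le _ _ (List.mem_map.mpr ⟨r, hr, rfl⟩))]
    simp only [List.length_replicate, List.map_map]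
    apply List.map_congr_left
    intro j hj
    simp only [Function.comp_apply, ← List.map_map]
    have hcount : ((((s0 :: rest).map String.toList).map (fun r => r.getD j ' ')).count '-')
        = ((s0 :: rest).map String.toList).countP (fun r => r.getD j ' ' == '-') := by
      rw [List.count_eq_countP, List.countP_map]
      rfl
    rw [hcount, getD_replicate_zero]
    simp
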